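-- pv_equiv track=rewrite | github.com/Alan-Collins/SpellTower-solver | process_dict.py | index_words
-- ===== SOURCE A (Python) =====
-- def index_words(words):
-- 	"""creates dict of word fragments to identify real words.
--
-- 	Creates a dict where keys are all possible fragments of words
-- 	(starting from the first character) and the values states whether
-- 	the key represents only a fragment of a word, only an entire word,
-- 	or both a fragment or and entire word.
--
-- 	For example, the string 'aardvark' is both a whole word and a
-- 	fragment of	the word 'aardvarks', while the string 'aardvarks' is
-- 	only a whole word, and the string 'aardv' is only a fragment of a
-- 	word.
--
-- 	Scoring strings in this way allows the exploration of growing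
-- 	strings and the identification of string that either are words,
-- 	may create words if they continue to grow, or are not words and can
-- 	not be part of words (i.e. if the string isn't in the dict).
--
-- 	Args:
-- 	  words (list):
-- 		A list of all the words to be processed
--
-- 	Returns:
-- 	  A dict mapping strings to a keyword value indicating whether the
-- 	  string is a word, is part of one or more words, or is both a word
-- 	  itself and part of one or more larger words. e.g.:
-- 	  {
-- 		'aardv': 'f',
-- 		'aardvark': 'b',
-- 		'aardvarks': 'w'
-- 	  }
--
-- 	  where values are abbreviations as follows:
-- 	  {'f':'fragment', 'b': 'both', 'w': 'word'}
-- 	"""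
--
-- 	d = {}
-- 	for word in words:
-- 		l = len(word)
-- 		# If the word is already in the dict then that means it was
-- 		# identified as a fragment of another word.
-- 		# Therefore, it should be both a word and fragment.
-- 		if word in d:
-- 			if d[word] != 'b':
-- 				d[word] = 'b'
-- 		# Otherwise it is just a word for now
-- 		else:
-- 			d[word] = 'w'
--
-- 		# If the word is longer than 3 letters, we need to go through
-- 		# all the possible fragments. e.g. for 5 letter word, do 3, 4, 5
-- 		# If the word is 3 letters then range won't return anything here
-- 		for i in range(3, l):
-- 			s = word[:i]
-- 			# If the string is in the dict and not already a fragment,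
-- 			# Then score is as 'b'
-- 			if s in d and d[s] != 'f':
-- 				d[s] = 'b'
-- 			else:
-- 				d[s] = 'f'
--
-- 	return d
-- ===== SOURCE B (Python) =====
-- def index_words(words):
-- 	"""Two-pass reimplementation: first count word occurrences and collect the
-- 	set of proper prefixes (length >= 3), then build the dict in first-mention
-- 	order, classifying each string once from those precomputed tables."""
-- 	wc = {}
-- 	for w in words:
-- 		wc[w] = wc.get(w, 0) + 1
-- 	frags = set()
-- 	for w in words:
-- 		for i in range(3, len(w)):
-- 			frags.add(w[:i])
-- 	out = {}
-- 	for w in words: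
-- 		for s in [w] + [w[:i] for i in range(3, len(w))]:
-- 			if s not in out:
-- 				c = wc.get(s, 0)
-- 				out[s] = 'f' if c == 0 else ('w' if c == 1 and s not in frags else 'b')
-- 	return out
-- ===== Notes on version B (the rewrite author's own statement) =====
-- stated objective: alternative
-- what changed: Replaces A's single-pass incremental state machine (dict values upgraded w/f/b as words and prefixes arrive) with a two-pass design: a word-occurrence counter and a set of all proper prefixes are built first, then every key is classified once by a pure formula, inserted in the same first-mention order.
import Mathlib
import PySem

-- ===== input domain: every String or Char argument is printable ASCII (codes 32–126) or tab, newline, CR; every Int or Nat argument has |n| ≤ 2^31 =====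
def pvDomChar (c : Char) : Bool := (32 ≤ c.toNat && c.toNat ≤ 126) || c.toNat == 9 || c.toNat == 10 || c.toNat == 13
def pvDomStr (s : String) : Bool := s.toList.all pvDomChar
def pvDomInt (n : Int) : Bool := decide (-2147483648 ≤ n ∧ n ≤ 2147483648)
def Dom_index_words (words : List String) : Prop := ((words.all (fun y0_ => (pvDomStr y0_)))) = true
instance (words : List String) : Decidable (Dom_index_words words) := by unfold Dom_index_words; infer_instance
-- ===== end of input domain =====

-- B replaces A's incremental w/f/b state machine with two precomputed tables (a word counter
-- and the set of proper prefixes) and a single pure classification per key; same cost, same result.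

-- ===== PORT A =====
def index_words (words : List String) : List (String × String) :=
  (words.foldl (fun (d : PySem.Dict String String) word =>
      let l : Int := PySem.Str.len word
      let d1 :=
        match d.get? word with
        | some v => if v ≠ "b" then d.insert word "b" else d
        | none => d.insert word "w"
      (PySem.List.pyRange 3 l 1).foldl (fun d i =>
          let s := PySem.Str.slice word none (some i)
          match d.get? s with
          | some v => if v ≠ "f" then d.insert s "b" else d.insert s "f"
          | none => d.insert s "f") d1)
    PySem.Dict.empty).items

-- ===== PORT B =====
def index_words_alt (words : List String) : List (String × String) :=
  let wc : PySem.Dict String Int :=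
    words.foldl (fun d w => d.modify w 0 (· + 1)) PySem.Dict.empty
  let frags : PySem.Set String :=
    words.foldl (fun s w =>
        (PySem.List.pyRange 3 (PySem.Str.len w) 1).foldl
          (fun s i => PySem.Set.add s (PySem.Str.slice w none (some i))) s)
      PySem.Set.empty
  (words.foldl (fun (out : PySem.Dict String String) w =>
      (w :: (PySem.List.pyRange 3 (PySem.Str.len w) 1).map
          (fun i => PySem.Str.slice w none (some i))).foldl
        (fun out s =>
          if out.contains s then out
          else
            let c := wc.getD s 0
            out.insert s (if c = 0 then "f" else if c = 1 ∧ s ∉ frags then "w" else "b"))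
        out)
    PySem.Dict.empty).items

-- ===== PRECONDITION & SPEC =====
def Spec_index_words (words : List String) (out : List (String × String)) : Prop := out = index_words_alt words
instance (words : List String) (out : List (String × String)) : Decidable (Spec_index_words words out) := by unfold Spec_index_words; infer_instance

-- ===== CLAIM (what is proved, stated in full; the proofs are below) =====
def Claim_equal_index_words : Prop := ∀ (words : List String), Dom_index_words words → Spec_index_words words (index_words words)

-- ===== LEMMAS AND PROOFS =====

-- proper prefixes word[:i], i = 3 .. len-1
def pvPrefixes (w : String) : List String :=
  (PySem.List.pyRange 3 (PySem.Str.len w) 1).map (fun i => PySem.Str.slice w none (some i))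

-- the "events" one word generates: itself as a word, then its prefixes as fragments
def pvEvs (w : String) : List (String × Bool) := (w, true) :: (pvPrefixes w).map (fun s => (s, false))

def pvE (words : List String) : List (String × Bool) := words.flatMap pvEvs

-- A's per-event dict transition
def pvStepA (d : PySem.Dict String String) (e : String × Bool) : PySem.Dict String String :=
  if e.2 then
    match d.get? e.1 with
    | some v => if v ≠ "b" then d.insert e.1 "b" else d
    | none => d.insert e.1 "w"
  else
    match d.get? e.1 with
    | some v => if v ≠ "f" then d.insert e.1 "b" else d.insert e.1 "f"
    | none => d.insert e.1 "f"

-- final value as a function of the event counts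
def pvG (wn fn : Nat) : String := if wn = 0 then "f" else if wn = 1 ∧ fn = 0 then "w" else "b"

def pvVal (es : List (String × Bool)) (s : String) : String :=
  pvG (es.count (s, true)) (es.count (s, false))

def pvCanon (es : List (String × Bool)) (val : String → String) : List (String × String) :=
  (PySem.Set.ofList (es.map (·.1))).map (fun s => (s, val s))

theorem pv_dict_ext {κ ν : Type} (d e : PySem.Dict κ ν) (h : d.items = e.items) : d = e := by
  cases d; cases e; simpa using h

theorem pv_get?_mapkeys (L : List String) (val : String → String) (x : String) :
    (PySem.Dict.mk (L.map (fun s => (s, val s)))).get? x =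
      if x ∈ L then some (val x) else none := by
  induction L with
  | nil => simp [PySem.Dict.get?]
  | cons a t ih =>
    rw [List.map_cons, PySem.Dict.get?_mk_cons, ih]
    by_cases h : a = x
    · subst h; simp
    · simp [h, Ne.symm h]

theorem pv_contains_mapkeys (L : List String) (val : String → String) (x : String) :
    (PySem.Dict.mk (L.map (fun s => (s, val s)))).contains x = decide (x ∈ L) := by
  rw [PySem.Dict.contains_eq_isSome_get?, pv_get?_mapkeys]
  by_cases h : x ∈ L <;> simp [h]

theorem pv_insert_mapkeys_mem (L : List String) (val : String → String) (x : String) (v : String)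
    (hx : x ∈ L) :
    (PySem.Dict.mk (L.map (fun s => (s, val s)))).insert x v =
      PySem.Dict.mk (L.map (fun s => (s, if s = x then v else val s))) := by
  have hc : (PySem.Dict.mk (L.map (fun s => (s, val s)))).contains x = true := by
    rw [pv_contains_mapkeys]; simpa
  apply pv_dict_ext
  rw [PySem.Dict.items_insert_of_contains _ v hc]
  show (L.map (fun s => (s, val s))).map _ = _
  rw [List.map_map]
  refine List.map_congr_left ?_
  intro s _
  by_cases h : s = x
  · subst h; simp
  · simp [h]

theorem pv_insert_mapkeys_not_mem (L : List String) (val : String → String) (x : String) (v : String)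
    (hx : x ∉ L) :
    (PySem.Dict.mk (L.map (fun s => (s, val s)))).insert x v =
      PySem.Dict.mk (L.map (fun s => (s, val s)) ++ [(x, v)]) := by
  have hc : (PySem.Dict.mk (L.map (fun s => (s, val s)))).contains x = false := by
    rw [pv_contains_mapkeys]; simpa
  apply pv_dict_ext
  rw [PySem.Dict.items_insert_of_not_contains _ v hc]

theorem pv_mem_fst (es : List (String × Bool)) (s : String) :
    s ∈ es.map (·.1) ↔ (s, true) ∈ es ∨ (s, false) ∈ es := by
  constructor
  · intro h
    rcases List.mem_map.1 h with ⟨⟨t, b⟩, hm, rfl⟩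
    cases b
    · exact Or.inr hm
    · exact Or.inl hm
  · rintro (h | h) <;> exact List.mem_map.2 ⟨_, h, rfl⟩

theorem pv_count_append_pair (es : List (String × Bool)) (s t : String) (b c : Bool) :
    (es ++ [(s, b)]).count (t, c) = es.count (t, c) + (if (t, c) = (s, b) then 1 else 0) := by
  rw [List.count_append]
  congr 1
  by_cases h : (t, c) = (s, b)
  · simp [h]
  · simp [List.count_cons, Ne.symm h, h]

theorem pvVal_append_ne (es : List (String × Bool)) (s t : String) (b : Bool) (h : t ≠ s) :
    pvVal (es ++ [(s, b)]) t = pvVal es t := by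
  unfold pvVal
  rw [pv_count_append_pair, pv_count_append_pair]
  simp [Prod.ext_iff, h]

theorem pvVal_append_self (es : List (String × Bool)) (s : String) (b : Bool) :
    pvVal (es ++ [(s, b)]) s =
      pvG (es.count (s, true) + (if b then 1 else 0))
          (es.count (s, false) + (if b then 0 else 1)) := by
  unfold pvVal
  rw [pv_count_append_pair, pv_count_append_pair]
  cases b <;> simp

-- A's fold over any event list yields the canonical first-occurrence assoc list
theorem pvA_fold (es : List (String × Bool)) :
    es.foldl pvStepA PySem.Dict.empty = PySem.Dict.mk (pvCanon es (pvVal es)) := by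
  induction es using List.reverseRecOn with
  | nil => rfl
  | append_singleton es e ih =>
    obtain ⟨s, b⟩ := e
    rw [List.foldl_append, List.foldl_cons, List.foldl_nil, ih]
    unfold pvCanon
    have hfst : (es ++ [(s, b)]).map (·.1) = es.map (·.1) ++ [s] := by simp
    by_cases hmem : s ∈ es.map (·.1)
    · -- s already a key: the key list is unchanged
      have hL : s ∈ PySem.Set.ofList (es.map (·.1)) := (PySem.Set.mem_ofList _ _).2 hmem
      have hcanon :
          (PySem.Set.ofList ((es ++ [(s, b)]).map (·.1))).map
              (fun t => (t, pvVal (es ++ [(s, b)]) t)) =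
            (PySem.Set.ofList (es.map (·.1))).map (fun t => (t, pvVal (es ++ [(s, b)]) t)) := by
        rw [hfst, PySem.Set.ofList_append_singleton, PySem.Set.add_of_mem hL]
      rw [hcanon]
      have hget := pv_get?_mapkeys (PySem.Set.ofList (es.map (·.1))) (pvVal es) s
      rw [if_pos hL] at hget
      have hpos : 0 < es.count (s, true) + es.count (s, false) := by
        rcases (pv_mem_fst es s).1 hmem with h | h
        · have := List.count_pos_iff.2 h; omega
        · have := List.count_pos_iff.2 h; omega
      have hfin : ∀ v : String,
          (∀ t ∈ PySem.Set.ofList (es.map (·.1)),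
              (if t = s then v else pvVal es t) = pvVal (es ++ [(s, b)]) t) →
          (PySem.Dict.mk ((PySem.Set.ofList (es.map (·.1))).map (fun t => (t, pvVal es t)))).insert s v =
            PySem.Dict.mk ((PySem.Set.ofList (es.map (·.1))).map
              (fun t => (t, pvVal (es ++ [(s, b)]) t))) := by
        intro v hv
        rw [pv_insert_mapkeys_mem _ _ _ _ hL]
        exact congrArg PySem.Dict.mk (List.map_congr_left (fun t ht => by rw [hv t ht]))
      have hkeep :
          (∀ t ∈ PySem.Set.ofList (es.map (·.1)), pvVal es t = pvVal (es ++ [(s, b)]) t) →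
          PySem.Dict.mk ((PySem.Set.ofList (es.map (·.1))).map (fun t => (t, pvVal es t))) =
            PySem.Dict.mk ((PySem.Set.ofList (es.map (·.1))).map
              (fun t => (t, pvVal (es ++ [(s, b)]) t))) :=
        fun hv => congrArg PySem.Dict.mk (List.map_congr_left (fun t ht => by rw [hv t ht]))
      cases b
      · -- fragment event on an existing key
        by_cases h0 : es.count (s, true) = 0
        · have hv : pvVal es s = "f" := by simp [pvVal, pvG, h0]
          have hstep :
              pvStepA (PySem.Dict.mk ((PySem.Set.ofList (es.map (·.1))).map
                (fun t => (t, pvVal es t)))) (s, false) =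
              (PySem.Dict.mk ((PySem.Set.ofList (es.map (·.1))).map
                (fun t => (t, pvVal es t)))).insert s "f" := by
            simp [pvStepA, hget, hv]
          rw [hstep]
          refine hfin "f" ?_
          intro t ht
          by_cases hts : t = s
          · subst hts
            simp [pvVal_append_self, pvG, h0]
          · simp [hts, pvVal_append_ne es s t false hts]
        · have hvne : pvVal es s ≠ "f" := by
            unfold pvVal pvG; split_ifs <;> simp_all
          have hstep :
              pvStepA (PySem.Dict.mk ((PySem.Set.ofList (es.map (·.1))).map
                (fun t => (t, pvVal es t)))) (s, false) =
              (PySem.Dict.mk ((PySem.Set.ofList (es.map (·.1))).map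
                (fun t => (t, pvVal es t)))).insert s "b" := by
            simp [pvStepA, hget, hvne]
          rw [hstep]
          refine hfin "b" ?_
          intro t ht
          by_cases hts : t = s
          · subst hts
            simp [pvVal_append_self, pvG, h0]
          · simp [hts, pvVal_append_ne es s t false hts]
      · -- word event on an existing key
        by_cases hb : pvVal es s = "b"
        · have hstep :
              pvStepA (PySem.Dict.mk ((PySem.Set.ofList (es.map (·.1))).map
                (fun t => (t, pvVal es t)))) (s, true) =
              PySem.Dict.mk ((PySem.Set.ofList (es.map (·.1))).map
                (fun t => (t, pvVal es t))) := by
            simp [pvStepA, hget, hb]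
          rw [hstep]
          refine hkeep ?_
          intro t ht
          by_cases hts : t = s
          · subst hts
            have ha : es.count (t, true) ≠ 0 := by
              intro h; rw [pvVal] at hb; simp [pvG, h] at hb
            rw [pvVal_append_self, hb]
            norm_num [pvG]
            intro h
            exact absurd h ha
          · rw [pvVal_append_ne es s t true hts]
        · have hstep :
              pvStepA (PySem.Dict.mk ((PySem.Set.ofList (es.map (·.1))).map
                (fun t => (t, pvVal es t)))) (s, true) =
              (PySem.Dict.mk ((PySem.Set.ofList (es.map (·.1))).map
                (fun t => (t, pvVal es t)))).insert s "b" := by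
            simp [pvStepA, hget, hb]
          rw [hstep]
          refine hfin "b" ?_
          intro t ht
          by_cases hts : t = s
          · subst hts
            have hcase : es.count (t, true) = 0 ∨
                (es.count (t, true) = 1 ∧ es.count (t, false) = 0) := by
              unfold pvVal pvG at hb
              split_ifs at hb with ha1 ha2
              · exact Or.inl ha1
              · exact Or.inr ha2
              · simp at hb
            rcases hcase with h | h
            · have hcf : es.count (t, false) ≠ 0 := by omega
              simp [pvVal_append_self, pvG, h, hcf]
            · norm_num [pvVal_append_self, pvG, h.1, h.2]
          · simp [hts, pvVal_append_ne es s t true hts]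
    · -- new key: appended at the end
      have hL : s ∉ PySem.Set.ofList (es.map (·.1)) := fun h => hmem ((PySem.Set.mem_ofList _ _).1 h)
      have h0t : es.count (s, true) = 0 := by
        rw [List.count_eq_zero]
        exact fun h => hmem ((pv_mem_fst es s).2 (Or.inl h))
      have h0f : es.count (s, false) = 0 := by
        rw [List.count_eq_zero]
        exact fun h => hmem ((pv_mem_fst es s).2 (Or.inr h))
      have hget := pv_get?_mapkeys (PySem.Set.ofList (es.map (·.1))) (pvVal es) s
      rw [if_neg hL] at hget
      have hcanon :
          (PySem.Set.ofList ((es ++ [(s, b)]).map (·.1))).map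
              (fun t => (t, pvVal (es ++ [(s, b)]) t)) =
            (PySem.Set.ofList (es.map (·.1))).map (fun t => (t, pvVal (es ++ [(s, b)]) t)) ++
              [(s, pvVal (es ++ [(s, b)]) s)] := by
        rw [hfst, PySem.Set.ofList_append_singleton, PySem.Set.add_of_not_mem hL, List.map_append]
        rfl
      have hrest : ∀ t ∈ PySem.Set.ofList (es.map (·.1)),
          pvVal es t = pvVal (es ++ [(s, b)]) t := by
        intro t ht
        have hts : t ≠ s := fun h => hL (h ▸ ht)
        rw [pvVal_append_ne es s t b hts]
      have hmap : (PySem.Set.ofList (es.map (·.1))).map (fun t => (t, pvVal es t)) =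
          (PySem.Set.ofList (es.map (·.1))).map (fun t => (t, pvVal (es ++ [(s, b)]) t)) :=
        List.map_congr_left (fun t ht => by rw [hrest t ht])
      have hvals : pvVal (es ++ [(s, b)]) s = (if b then "w" else "f") := by
        rw [pvVal_append_self, h0t, h0f]
        cases b <;> simp [pvG]
      have hstep :
          pvStepA (PySem.Dict.mk ((PySem.Set.ofList (es.map (·.1))).map
            (fun t => (t, pvVal es t)))) (s, b) =
          (PySem.Dict.mk ((PySem.Set.ofList (es.map (·.1))).map
            (fun t => (t, pvVal es t)))).insert s (if b then "w" else "f") := by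
        cases b <;> simp [pvStepA, hget]
      rw [hstep, pv_insert_mapkeys_not_mem _ _ _ _ hL, hcanon]
      refine congrArg PySem.Dict.mk ?_
      rw [hmap, hvals]

-- port A is the event fold
theorem pvA_events (words : List String) :
    index_words words = ((pvE words).foldl pvStepA PySem.Dict.empty).items := by
  unfold index_words pvE
  rw [List.foldl_flatMap]
  refine congrArg PySem.Dict.items ?_
  refine congrArg (fun f => List.foldl f PySem.Dict.empty words) ?_
  funext d w
  simp [pvEvs, pvStepA, pvPrefixes, List.foldl_map]

-- B's insert-if-absent fold yields the canonical assoc list for a fixed classifier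
theorem pvB_fold (ss : List String) (cf : String → String) :
    ss.foldl (fun out s => if out.contains s then out else out.insert s (cf s)) PySem.Dict.empty =
      PySem.Dict.mk ((PySem.Set.ofList ss).map (fun s => (s, cf s))) := by
  induction ss using List.reverseRecOn with
  | nil => rfl
  | append_singleton t x ih =>
    rw [List.foldl_append, List.foldl_cons, List.foldl_nil, ih, PySem.Set.ofList_append_singleton]
    rw [pv_contains_mapkeys]
    by_cases h : x ∈ PySem.Set.ofList t
    · simp [h, PySem.Set.add_of_mem h]
    · simp only [h, decide_false, Bool.false_eq_true, if_false]
      rw [pv_insert_mapkeys_not_mem _ _ _ _ h, PySem.Set.add_of_not_mem h, List.map_append]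
      simp

theorem pv_map_fst_E (words : List String) :
    (pvE words).map (·.1) = words.flatMap (fun w => w :: pvPrefixes w) := by
  simp [pvE, pvEvs, List.map_flatMap, List.map_map, Function.comp_def]

theorem pv_count_true (words : List String) (s : String) :
    (pvE words).count (s, true) = words.count s := by
  induction words with
  | nil => rfl
  | cons w ws ih =>
    have h1 : ((pvPrefixes w).map (fun t => (t, false))).count (s, true) = 0 := by
      rw [List.count_eq_zero]; simp
    rw [pvE, List.flatMap_cons]
    rw [List.count_append]
    show (pvEvs w).count (s, true) + (pvE ws).count (s, true) = _
    rw [ih]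
    unfold pvEvs
    rw [List.count_cons, h1, List.count_cons]
    simp [Prod.ext_iff]
    omega

theorem pv_count_false_eq_zero (words : List String) (s : String) :
    (pvE words).count (s, false) = 0 ↔ ∀ w ∈ words, s ∉ pvPrefixes w := by
  induction words with
  | nil => simp [pvE]
  | cons w ws ih =>
    rw [pvE, List.flatMap_cons, List.count_append]
    show (pvEvs w).count (s, false) + (pvE ws).count (s, false) = 0 ↔ _
    have h1 : (pvEvs w).count (s, false) = (pvPrefixes w).count s := by
      unfold pvEvs
      rw [List.count_cons]
      have hcm : ∀ l : List String, (l.map (fun t => (t, false))).count (s, false) = l.count s := by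
        intro l
        induction l with
        | nil => rfl
        | cons a l ihh => simp [List.count_cons, ihh, Prod.ext_iff]
      simp [hcm]
    rw [h1]
    constructor
    · intro h
      intro u hu
      rcases List.mem_cons.1 hu with rfl | hu'
      · exact fun hm => by have := List.count_pos_iff.2 hm; omega
      · exact (ih.1 (by omega)) u hu'
    · intro h
      have ha : (pvPrefixes w).count s = 0 := List.count_eq_zero.2 (h w (by simp))
      have hb : (pvE ws).count (s, false) = 0 := ih.2 (fun u hu => h u (List.mem_cons_of_mem _ hu))
      omega

theorem pv_mem_foldl_update (ws : List String) (acc : PySem.Set String) (x : String) :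
    x ∈ ws.foldl (fun s w => PySem.Set.update s (pvPrefixes w)) acc ↔
      x ∈ acc ∨ ∃ w ∈ ws, x ∈ pvPrefixes w := by
  induction ws generalizing acc with
  | nil => simp
  | cons w ws ih =>
    rw [List.foldl_cons, ih, PySem.Set.mem_update]
    simp [or_assoc]

-- port B computes the canonical assoc list with the counter/fragment classifier
theorem pvB_canon (words : List String) :
    index_words_alt words = pvCanon (pvE words) (fun s =>
      if words.count s = 0 then "f"
      else if words.count s = 1 ∧ ¬ (∃ w ∈ words, s ∈ pvPrefixes w) then "w" else "b") := by
  unfold index_words_alt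
  rw [← PySem.Dict.counter_eq_foldl]
  simp only [← PySem.Set.update_map_eq_foldl_add]
  rw [← List.foldl_flatMap]
  have hpp : ∀ w : String,
      (PySem.List.pyRange 3 (PySem.Str.len w) 1).map (fun i => PySem.Str.slice w none (some i)) =
        pvPrefixes w := fun w => rfl
  simp only [hpp]
  rw [pvB_fold]
  unfold pvCanon
  rw [pv_map_fst_E]
  refine congrArg PySem.Dict.items (congrArg PySem.Dict.mk (List.map_congr_left ?_))
  intro s _
  have hc : (PySem.Dict.counter words).getD s 0 = (words.count s : Int) :=
    PySem.Dict.getD_counter words s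
  have hf : (s ∈ words.foldl (fun acc w => PySem.Set.update acc (pvPrefixes w)) ([] : PySem.Set String)) ↔
      ∃ w ∈ words, s ∈ pvPrefixes w := by
    rw [pv_mem_foldl_update]
    simp
  rw [hc]
  by_cases h0 : words.count s = 0
  · simp [h0]
  · have h0' : ¬ ((words.count s : Int) = 0) := by exact_mod_cast h0
    by_cases h1 : words.count s = 1
    · have h1' : (words.count s : Int) = 1 := by exact_mod_cast h1
      by_cases h2 : ∃ w ∈ words, s ∈ pvPrefixes w
      · simp [h0, h0', h1, h1', hf, h2]
      · simp [h0, h0', h1, h1', hf, h2]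
    · have h1' : ¬ ((words.count s : Int) = 1) := by exact_mod_cast h1
      simp [h0, h0', h1, h1']

-- ===== VERDICT (by name: the statement is the Claim_ definition above) =====
theorem index_words_spec : Claim_equal_index_words := by
  intro words _
  unfold Spec_index_words
  rw [pvA_events, pvA_fold, pvB_canon]
  unfold pvCanon
  refine congrArg PySem.Dict.items (congrArg PySem.Dict.mk (List.map_congr_left ?_))
  intro s _
  have hct := pv_count_true words s
  have hcf := pv_count_false_eq_zero words s
  unfold pvVal pvG
  rw [hct]
  by_cases h0 : words.count s = 0
  · simp [h0]
  · by_cases h1 : words.count s = 1 ∧ ¬ (∃ w ∈ words, s ∈ pvPrefixes w)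
    · have hz : (pvE words).count (s, false) = 0 := by
        rw [hcf]; intro w hw hm; exact h1.2 ⟨w, hw, hm⟩
      simp [h0, h1.1, hz, h1]
    · have hnz : ¬ (words.count s = 1 ∧ (pvE words).count (s, false) = 0) := by
        rintro ⟨hc1, hz⟩
        exact h1 ⟨hc1, fun ⟨w, hw, hm⟩ => (hcf.1 hz w hw) hm⟩
      simp [h0, h1, hnz]
      intro hc1
      by_contra hno
      exact hnz ⟨hc1, hcf.2 (fun w hw hm => hno ⟨w, hw, hm⟩)⟩
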